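-- pv_equiv track=rewrite | github.com/aoisakanana/railway_py | railway/core/dag/sync_cache.py | detect_changed_nodes
-- ===== SOURCE A (Python) =====
-- def detect_changed_nodes(
--     current_hashes: dict[str, str],
--     cached_hashes: dict[str, str],
-- ) -> frozenset[str]:
--     """変更されたノードを検出する（純粋関数）。
--
--     新規追加・ハッシュ変更・削除のすべてを「変更あり」として返す。
--
--     Args:
--         current_hashes: 現在のノード名 → ハッシュ
--         cached_hashes: キャッシュされたノード名 → ハッシュ
--
--     Returns:
--         変更されたノード名の frozenset
--     """
--     changed: set[str] = set()
--
--     # 新規追加 or 変更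
--     for name, hash_val in current_hashes.items():
--         if name not in cached_hashes or cached_hashes[name] != hash_val:
--             changed.add(name)
--
--     # 削除
--     for name in cached_hashes:
--         if name not in current_hashes:
--             changed.add(name)
--
--     return frozenset(changed)
-- ===== SOURCE B (Python) =====
-- def detect_changed_nodes(
--     current_hashes: dict[str, str],
--     cached_hashes: dict[str, str],
-- ) -> frozenset[str]:
--     """Set algebra on the items views: a node changed iff its (name, hash)
--     pair belongs to exactly one of the two dicts."""
--     return frozenset(
--         name for name, _ in current_hashes.items() ^ cached_hashes.items()
--     )
-- ===== Notes on version B (the rewrite author's own statement) =====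
-- stated objective: simpler
-- what changed: Replaces A's two explicit loops with per-key lookups by set algebra: the symmetric difference of the two items() views contains exactly the (name, hash) pairs present in one dict only, and projecting their keys gives the changed nodes.
import Mathlib
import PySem

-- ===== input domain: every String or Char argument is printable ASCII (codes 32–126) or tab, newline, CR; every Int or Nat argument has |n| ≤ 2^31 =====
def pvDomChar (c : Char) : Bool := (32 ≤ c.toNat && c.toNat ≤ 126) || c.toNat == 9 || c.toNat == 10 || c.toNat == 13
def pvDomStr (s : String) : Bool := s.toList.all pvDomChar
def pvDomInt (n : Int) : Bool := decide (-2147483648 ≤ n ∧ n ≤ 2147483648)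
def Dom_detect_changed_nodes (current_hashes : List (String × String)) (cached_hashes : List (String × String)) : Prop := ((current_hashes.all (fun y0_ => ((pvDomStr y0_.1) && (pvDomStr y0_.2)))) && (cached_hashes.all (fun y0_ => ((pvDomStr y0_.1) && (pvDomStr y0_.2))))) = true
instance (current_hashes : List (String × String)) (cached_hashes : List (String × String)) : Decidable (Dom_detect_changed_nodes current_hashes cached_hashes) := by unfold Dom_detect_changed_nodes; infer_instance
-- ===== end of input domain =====

-- B replaces A's two lookup loops by set algebra on the (name, hash) item pairs:
-- the keys of the symmetric difference of the two items() views (objective: simpler).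
-- Both return a set; equality is proved on the ports' concrete element lists.

-- ===== PORT A =====
def detect_changed_nodes (current_hashes : List (String × String)) (cached_hashes : List (String × String)) : List String :=
  -- changed: set[str] = set()
  let changed : PySem.Set String := PySem.Set.empty
  -- for name, hash_val in current_hashes.items(): if name not in cached or cached[name] != hash_val: changed.add(name)
  let changed := current_hashes.foldl (fun changed p =>
    if !(PySem.Dict.mk cached_hashes).contains p.1
        || !((PySem.Dict.mk cached_hashes).get? p.1 == some p.2)
    then PySem.Set.add changed p.1 else changed) changed
  -- for name in cached_hashes: if name not in current_hashes: changed.add(name)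
  let changed := cached_hashes.foldl (fun changed p =>
    if !(PySem.Dict.mk current_hashes).contains p.1
    then PySem.Set.add changed p.1 else changed) changed
  changed

-- ===== PORT B =====
def detect_changed_nodes_alt (current_hashes : List (String × String)) (cached_hashes : List (String × String)) : List String :=
  -- current_hashes.items() ^ cached_hashes.items()  (items views are sets of pairs)
  let sd : PySem.Set (String × String) :=
    PySem.Set.symmDiff (PySem.Set.ofList current_hashes) (PySem.Set.ofList cached_hashes)
  -- frozenset(name for name, _ in sd)
  PySem.Set.ofList (sd.map Prod.fst)

-- ===== PRECONDITION & SPEC =====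
-- Pre_ admits exactly the association lists that represent a Python dict:
-- lists with a duplicated key do not arise from A's dict arguments at all.
def Pre_detect_changed_nodes (current_hashes : List (String × String)) (cached_hashes : List (String × String)) : Prop :=
  (current_hashes.map Prod.fst).Nodup ∧ (cached_hashes.map Prod.fst).Nodup
instance (current_hashes : List (String × String)) (cached_hashes : List (String × String)) : Decidable (Pre_detect_changed_nodes current_hashes cached_hashes) := by unfold Pre_detect_changed_nodes; infer_instance

def pvWitness_detect_changed_nodes : (List (String × String)) × (List (String × String)) :=
  ([("a", "1"), ("b", "2")], [("b", "9"), ("c", "3")])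

def Spec_detect_changed_nodes (current_hashes : List (String × String)) (cached_hashes : List (String × String)) (out : List String) : Prop := out = detect_changed_nodes_alt current_hashes cached_hashes
instance (current_hashes : List (String × String)) (cached_hashes : List (String × String)) (out : List String) : Decidable (Spec_detect_changed_nodes current_hashes cached_hashes out) := by unfold Spec_detect_changed_nodes; infer_instance

-- ===== CLAIM (what is proved, stated in full; the proofs are below) =====
def Claim_equal_detect_changed_nodes : Prop := ∀ (current_hashes : List (String × String)) (cached_hashes : List (String × String)), Dom_detect_changed_nodes current_hashes cached_hashes → Pre_detect_changed_nodes current_hashes cached_hashes → Spec_detect_changed_nodes current_hashes cached_hashes (detect_changed_nodes current_hashes cached_hashes)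

-- ===== LEMMAS AND PROOFS =====

-- lookups on a literal dict, in terms of find? over the item list
theorem dget_eq (l : List (String × String)) (k : String) :
    (PySem.Dict.mk l).get? k = Option.map Prod.snd (l.find? (fun p => p.1 == k)) := rfl

theorem dcontains_iff (l : List (String × String)) (k : String) :
    (PySem.Dict.mk l).contains k = true ↔ k ∈ l.map Prod.fst := by
  simp

theorem dget_of_mem_nodup (l : List (String × String)) (q : String × String)
    (hq : q ∈ l) (hnd : (l.map Prod.fst).Nodup) :
    (PySem.Dict.mk l).get? q.1 = some q.2 := by
  induction l with
  | nil => cases hq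
  | cons p t ih =>
    rw [dget_eq]
    rcases List.mem_cons.mp hq with hq | hq
    · subst hq; simp [List.find?]
    · have hnd' := hnd
      simp only [List.map_cons, List.nodup_cons] at hnd'
      have hne : (p.1 == q.1) = false := by
        have : q.1 ∈ t.map Prod.fst := List.mem_map_of_mem hq
        simp only [beq_eq_false_iff_ne, ne_eq]
        intro he; exact hnd'.1 (he ▸ this)
      simp only [List.find?, hne]
      exact (dget_eq t q.1) ▸ ih hq hnd'.2

-- a pair is an item of a nodup-key dict iff the lookup of its key returns its value
theorem mem_iff_dget (l : List (String × String)) (q : String × String)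
    (hnd : (l.map Prod.fst).Nodup) :
    q ∈ l ↔ (PySem.Dict.mk l).get? q.1 = some q.2 := by
  constructor
  · intro hq; exact dget_of_mem_nodup l q hq hnd
  · intro h
    rw [dget_eq] at h
    cases hf : l.find? (fun p => p.1 == q.1) with
    | none => simp [hf] at h
    | some r =>
      have hr : r ∈ l := List.mem_of_find?_eq_some hf
      have hk : r.1 = q.1 := by simpa using List.find?_some hf
      have hv : r.2 = q.2 := by simp [hf] at h; exact h
      have : r = q := Prod.ext hk hv
      exact this ▸ hr

-- A's guarded-add loop appends the filtered keys, provided they are all new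
theorem foldl_setadd_if (l : List (String × String)) (p : String × String → Bool)
    (s : List String)
    (hnew : ∀ q ∈ l, p q = true → q.1 ∉ s)
    (hnd : ((l.filter p).map Prod.fst).Nodup) :
    l.foldl (fun acc q => if p q then PySem.Set.add acc q.1 else acc) s
      = s ++ (l.filter p).map Prod.fst := by
  induction l generalizing s with
  | nil => simp
  | cons q t ih =>
    by_cases hp : p q = true
    · have hqs : q.1 ∉ s := hnew q (by simp) hp
      have hadd : PySem.Set.add s q.1 = s ++ [q.1] := by
        simp [PySem.Set.add, PySem.Set.contains, hqs]
      have hfil : (q :: t).filter p = q :: t.filter p := by simp [List.filter, hp]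
      rw [hfil] at hnd
      simp only [List.map_cons, List.nodup_cons] at hnd
      have := ih (s := s ++ [q.1])
        (fun r hr hpr => by
          intro hmem
          rcases List.mem_append.mp hmem with h | h
          · exact hnew r (by simp [hr]) hpr h
          · have : r.1 ∈ (t.filter p).map Prod.fst :=
              List.mem_map_of_mem (List.mem_filter.mpr ⟨hr, hpr⟩)
            simp only [List.mem_singleton] at h
            exact hnd.1 (h ▸ this))
        hnd.2
      rw [List.foldl_cons, if_pos hp, hadd, this, hfil]
      simp
    · have hp' : p q = false := by simpa using hp
      have hfil : (q :: t).filter p = t.filter p := by simp [List.filter, hp']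
      rw [hfil] at hnd
      have := ih (s := s) (fun r hr hpr => hnew r (by simp [hr]) hpr) hnd
      rw [List.foldl_cons, if_neg hp, hfil]
      exact this

-- folding Set.add of a nodup list appends the genuinely new elements
theorem foldl_set_add (t : List String) (s : List String) (ht : t.Nodup) :
    t.foldl PySem.Set.add s = s ++ t.filter (fun x => !s.contains x) := by
  induction t generalizing s with
  | nil => simp
  | cons x r ih =>
    simp only [List.nodup_cons] at ht
    by_cases hx : s.contains x = true
    · have hadd : PySem.Set.add s x = s := by
        simp [PySem.Set.add, PySem.Set.contains]
        simpa using hx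
      have hmem : x ∈ s := by simpa using hx
      rw [List.foldl_cons, hadd, ih s ht.2, List.filter_cons]
      simp [hmem]
    · have hxmem : x ∉ s := by simpa using hx
      have hadd : PySem.Set.add s x = s ++ [x] := by
        simp [PySem.Set.add, PySem.Set.contains, hxmem]
      have hcong : r.filter (fun y => !(s ++ [x]).contains y)
          = r.filter (fun y => !s.contains y) := by
        apply List.filter_congr
        intro y hy
        have hyx : y ≠ x := fun he => ht.1 (he ▸ hy)
        simp [hyx]
      rw [List.foldl_cons, hadd, ih (s ++ [x]) ht.2, hcong, List.filter_cons]
      simp [hxmem]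

-- ===== VERDICT (by name: the statement is the Claim_ definition above) =====
theorem detect_changed_nodes_spec : Claim_equal_detect_changed_nodes := by
  intro cur cached _ hpre
  rcases hpre with ⟨hc, hd⟩
  unfold Spec_detect_changed_nodes
  set pA : String × String → Bool := fun p =>
    !(PySem.Dict.mk cached).contains p.1 || !((PySem.Dict.mk cached).get? p.1 == some p.2) with hpA
  set pDel : String × String → Bool := fun p => !(PySem.Dict.mk cur).contains p.1 with hpDel
  set qA : String × String → Bool := fun p => !PySem.Set.contains cached p with hqA
  set qB : String × String → Bool := fun p => !PySem.Set.contains cur p with hqB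
  have hndc : cur.Nodup := hc.of_map
  have hndd : cached.Nodup := hd.of_map
  -- A's first pass
  have h1 : cur.foldl (fun acc q => if pA q then PySem.Set.add acc q.1 else acc) PySem.Set.empty
      = (cur.filter pA).map Prod.fst := by
    have := foldl_setadd_if cur pA [] (by intro q _ _ h; simp at h)
      (hc.sublist (List.Sublist.map _ List.filter_sublist))
    simpa [PySem.Set.empty] using this
  -- A's second pass
  have h2 : cached.foldl (fun acc q => if pDel q then PySem.Set.add acc q.1 else acc)
        ((cur.filter pA).map Prod.fst)
      = (cur.filter pA).map Prod.fst ++ (cached.filter pDel).map Prod.fst := by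
    apply foldl_setadd_if
    · intro q hq hpq hmem
      rcases List.mem_map.mp hmem with ⟨r, hr, hrk⟩
      have : q.1 ∈ cur.map Prod.fst :=
        hrk ▸ List.mem_map_of_mem (List.mem_filter.mp hr).1
      have := (dcontains_iff cur q.1).mpr this
      rw [hpDel] at hpq; simp [this] at hpq
    · exact hd.sublist (List.Sublist.map _ List.filter_sublist)
  have hA : detect_changed_nodes cur cached
      = (cur.filter pA).map Prod.fst ++ (cached.filter pDel).map Prod.fst := by
    show cached.foldl (fun acc q => if pDel q then PySem.Set.add acc q.1 else acc)
        (cur.foldl (fun acc q => if pA q then PySem.Set.add acc q.1 else acc) PySem.Set.empty)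
      = _
    rw [h1, h2]
  -- B: the symmetric difference of the item lists, under nodup pairs
  have hBsd : detect_changed_nodes_alt cur cached
      = PySem.Set.ofList ((cur.filter qA).map Prod.fst ++ (cached.filter qB).map Prod.fst) := by
    show PySem.Set.ofList ((PySem.Set.symmDiff (PySem.Set.ofList cur) (PySem.Set.ofList cached)).map Prod.fst) = _
    rw [PySem.Set.ofList_eq_self_of_nodup cur hndc, PySem.Set.ofList_eq_self_of_nodup cached hndd]
    show PySem.Set.ofList ((cur.filter qA ++ cached.filter qB).map Prod.fst) = _
    rw [List.map_append]
  -- Bool-level forms of the membership tests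
  have bcontains_eq : ∀ {α : Type} [inst : BEq α] [LawfulBEq α] (l : List α) (x : α),
      l.contains x = decide (x ∈ l) := by
    intro α _ _ l x; rw [Bool.eq_iff_iff]; simp
  have dcontains_eq : ∀ (l : List (String × String)) (k : String),
      (PySem.Dict.mk l).contains k = decide (k ∈ l.map Prod.fst) := by
    intro l k; rw [Bool.eq_iff_iff]; simp
  -- the current-side filters agree
  have hM1 : (cur.filter qA).map Prod.fst = (cur.filter pA).map Prod.fst := by
    apply congrArg (List.map Prod.fst)
    apply List.filter_congr
    intro q hq
    show qA q = pA q
    rw [hqA, hpA]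
    simp only [PySem.Set.contains_eq_listContains, bcontains_eq, dcontains_eq]
    by_cases hin : q ∈ cached
    · have hg : (PySem.Dict.mk cached).get? q.1 = some q.2 :=
        dget_of_mem_nodup cached q hin hd
      simp [hin, List.mem_map_of_mem (f := Prod.fst) hin, hg]
    · have hgb : ((PySem.Dict.mk cached).get? q.1 == some q.2) = false := by
        simp only [beq_eq_false_iff_ne, ne_eq]
        exact fun h => hin ((mem_iff_dget cached q hd).mpr h)
      simp [hin, hgb]
  -- every key of the first block is a current key
  have hL1sub : ∀ x ∈ (cur.filter pA).map Prod.fst, x ∈ cur.map Prod.fst := by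
    intro x hx
    rcases List.mem_map.mp hx with ⟨r, hr, hrk⟩
    exact hrk ▸ List.mem_map_of_mem (List.mem_filter.mp hr).1
  have hM1nd : ((cur.filter pA).map Prod.fst).Nodup :=
    hc.sublist (List.Sublist.map _ List.filter_sublist)
  have hM2nd : ((cached.filter qB).map Prod.fst).Nodup :=
    hd.sublist (List.Sublist.map _ List.filter_sublist)
  -- frozenset of the concatenation = first block ++ new keys of second block
  have hfz : PySem.Set.ofList ((cur.filter pA).map Prod.fst ++ (cached.filter qB).map Prod.fst)
      = (cur.filter pA).map Prod.fst
        ++ ((cached.filter qB).map Prod.fst).filter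
             (fun x => !((cur.filter pA).map Prod.fst).contains x) := by
    rw [PySem.Set.ofList_append, PySem.Set.ofList_eq_self_of_nodup _ hM1nd]
    show ((cached.filter qB).map Prod.fst).foldl PySem.Set.add ((cur.filter pA).map Prod.fst) = _
    exact foldl_set_add _ _ hM2nd
  -- the surviving second-block keys are exactly A's deleted keys
  have hM2 : ((cached.filter qB).map Prod.fst).filter
        (fun x => !((cur.filter pA).map Prod.fst).contains x)
      = (cached.filter pDel).map Prod.fst := by
    rw [List.filter_map, List.filter_filter]
    apply congrArg (List.map Prod.fst)
    apply List.filter_congr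
    intro q hq
    show (!((cur.filter pA).map Prod.fst).contains q.1 && qB q) = pDel q
    rw [hqB, hpDel]
    simp only [PySem.Set.contains_eq_listContains, bcontains_eq, dcontains_eq]
    by_cases hk : q.1 ∈ cur.map Prod.fst
    · by_cases hin : q ∈ cur
      · simp [hk, hin]
      · rcases List.mem_map.mp hk with ⟨r, hr, hrk⟩
        have hrq : r ≠ q := fun he => hin (he ▸ hr)
        have hr2 : r.2 ≠ q.2 := fun he => hrq (Prod.ext hrk he)
        have hgq : (PySem.Dict.mk cached).get? q.1 = some q.2 :=
          dget_of_mem_nodup cached q hq hd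
        have hpr : pA r = true := by
          have hb : ((PySem.Dict.mk cached).get? r.1 == some r.2) = false := by
            rw [hrk, hgq]
            simp only [beq_eq_false_iff_ne, ne_eq, Option.some.injEq]
            exact fun he => hr2 he.symm
          simp [hpA, hb]
        have hq1 : q.1 ∈ (cur.filter pA).map Prod.fst :=
          hrk ▸ List.mem_map_of_mem (List.mem_filter.mpr ⟨hr, hpr⟩)
        simp [hk, hq1]
    · have hin : q ∉ cur := fun h => hk (List.mem_map_of_mem h)
      have hq1 : q.1 ∉ (cur.filter pA).map Prod.fst := fun h => hk (hL1sub q.1 h)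
      simp [hk, hin, hq1]
  rw [hA, hBsd, hM1, hfz, hM2]
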